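-- pv_equiv track=rewrite | github.com/Jakub-Woszczek/Algorithms-and-Data-Structures-AGH-CS-Course- | Moje kolosy/Kolos 1 ASD/1. Próba ( od tyłu) ZALICZA.py | maxrak
-- ===== SOURCE A (Python) =====
-- def maxrak(T):
--     n = len(T)
--     ranks_all = [0]*n
--     max_cnt = 0
--     for i in range(n-1,0,-1):
--         cnt = 0
--         if i <= max_cnt:
--             return max_cnt
--         for j in range(i-1,-1,-1):
--             if T[j] < T[i]:
--                 cnt +=1
--         ranks_all[i] = cnt
--         if cnt > max_cnt:
--             max_cnt = cnt
--
--     return max_cnt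
-- ===== SOURCE B (Python) =====
-- def maxrak(T):
--     # Maintain a sorted list of the elements seen so far; for each new element,
--     # a binary search gives the number of smaller elements to its left directly.
--     seen = []
--     best = 0
--     for x in T:
--         lo, hi = 0, len(seen)
--         while lo < hi:
--             mid = (lo + hi) // 2
--             if seen[mid] < x:
--                 lo = mid + 1
--             else:
--                 hi = mid
--         if lo > best:
--             best = lo
--         seen.insert(lo, x)
--     return best
-- ===== Notes on version B (the rewrite author's own statement) =====
-- stated objective: faster
-- what changed: Replaces the right-to-left nested counting scan with a single left-to-right pass that keeps the prefix as a sorted list and finds each element's smaller-count by binary search (insertion into the sorted list).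
import Mathlib
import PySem

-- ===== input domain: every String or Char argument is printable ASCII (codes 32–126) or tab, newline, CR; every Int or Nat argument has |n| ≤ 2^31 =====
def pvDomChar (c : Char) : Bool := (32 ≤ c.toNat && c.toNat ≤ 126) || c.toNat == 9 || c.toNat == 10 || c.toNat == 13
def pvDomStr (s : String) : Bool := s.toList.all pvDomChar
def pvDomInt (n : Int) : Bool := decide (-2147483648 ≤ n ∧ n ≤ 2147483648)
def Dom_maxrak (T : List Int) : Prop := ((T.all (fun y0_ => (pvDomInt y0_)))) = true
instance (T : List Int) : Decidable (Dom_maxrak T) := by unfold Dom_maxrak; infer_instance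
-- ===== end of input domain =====

-- B replaces A's right-to-left nested counting scan by one left-to-right pass that keeps the
-- seen prefix sorted and binary-searches each element's smaller-count (objective: faster).

-- ===== PORT A =====
-- inner loop: for j in range(i-1,-1,-1): if T[j] < T[i]: cnt += 1   (indices always in range here,
-- so T[j] / T[i] are ported with pyGetD)
def maxrakInner (T : List Int) (i : Int) : Int :=
  (PySem.List.pyRange (i - 1) (-1) (-1)).foldl
    (fun cnt j => if PySem.List.pyGetD T j 0 < PySem.List.pyGetD T i 0 then cnt + 1 else cnt) 0

-- outer loop with the early 'return max_cnt' when i <= max_cnt; ranks_all is written but never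
-- read in A, so it carries no state here
def maxrakLoop (T : List Int) : List Int → Int → Int
  | [], m => m
  | i :: rest, m =>
    if i ≤ m then m
    else
      let cnt := maxrakInner T i
      maxrakLoop T rest (if cnt > m then cnt else m)

def maxrak (T : List Int) : Int :=
  maxrakLoop T (PySem.List.pyRange ((T.length : Int) - 1) 0 (-1)) 0

-- ===== PORT B =====
-- while lo < hi: mid = (lo+hi)//2; ...   (seen[mid] always in range, ported with getD)
def bisectLoop (seen : List Int) (x : Int) (lo hi : Nat) : Nat :=
  if _h : lo < hi then
    let mid := (lo + hi) / 2
    if seen.getD mid 0 < x then bisectLoop seen x (mid + 1) hi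
    else bisectLoop seen x lo mid
  else lo
termination_by hi - lo
decreasing_by all_goals omega

-- loop body: binary search, best update, seen.insert(lo, x)
def bStep (st : List Int × Int) (x : Int) : List Int × Int :=
  let c := bisectLoop st.1 x 0 st.1.length
  (st.1.take c ++ x :: st.1.drop c, if (c : Int) > st.2 then (c : Int) else st.2)

def maxrak_alt (T : List Int) : Int :=
  (T.foldl bStep ([], 0)).2

-- ===== PRECONDITION & SPEC =====
def Spec_maxrak (T : List Int) (out : Int) : Prop := out = maxrak_alt T
instance (T : List Int) (out : Int) : Decidable (Spec_maxrak T out) := by unfold Spec_maxrak; infer_instance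

-- ===== CLAIM (what is proved, stated in full; the proofs are below) =====
def Claim_equal_maxrak : Prop := ∀ (T : List Int), Dom_maxrak T → Spec_maxrak T (maxrak T)

-- ===== LEMMAS AND PROOFS =====

-- the common specification: walk the list left to right, taking the max of
-- "number of elements smaller than x in the prefix before x"
def specGo : List Int → List Int → Int → Int
  | [], _, best => best
  | x :: rest, pre, best =>
      specGo rest (pre ++ [x]) (max best ((pre.countP (fun y => decide (y < x)) : Int)))

-- (1) sorted-list characterisation: the m-th element is < x iff m < (number of elements < x)
theorem sorted_getD_lt_iff (x : Int) : ∀ (l : List Int), l.Pairwise (· ≤ ·) →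
    ∀ m : Nat, m < l.length →
    (l.getD m 0 < x ↔ m < l.countP (fun y => decide (y < x))) := by
  intro l
  induction l with
  | nil => intro _ m hm; simp at hm
  | cons a t ih =>
    intro hs m hm
    rw [List.pairwise_cons] at hs
    obtain ⟨ha, ht⟩ := hs
    rcases m with _ | m
    · simp only [List.getD_cons_zero, List.countP_cons]
      constructor
      · intro h; simp [h]
      · intro h
        by_contra hax
        push Not at hax
        have h0 : t.countP (fun y => decide (y < x)) = 0 := by
          rw [List.countP_eq_zero]
          intro y hy
          simp only [decide_eq_true_eq]
          have := ha y hy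
          omega
        simp [h0, show ¬ a < x by omega] at h
    · simp only [List.getD_cons_succ, List.countP_cons]
      have hm' : m < t.length := by simpa using hm
      rw [ih ht m hm']
      by_cases hax : a < x
      · simp [hax]
      · have h0 : t.countP (fun y => decide (y < x)) = 0 := by
          rw [List.countP_eq_zero]
          intro y hy
          simp only [decide_eq_true_eq]
          have := ha y hy
          omega
        simp [h0, hax]

-- (2) binary search returns the count of elements < x
theorem bisect_eq (seen : List Int) (x : Int) (hs : seen.Pairwise (· ≤ ·)) :
    ∀ (n lo hi : Nat), hi - lo ≤ n →
      lo ≤ seen.countP (fun y => decide (y < x)) →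
      seen.countP (fun y => decide (y < x)) ≤ hi → hi ≤ seen.length →
      bisectLoop seen x lo hi = seen.countP (fun y => decide (y < x)) := by
  intro n
  induction n with
  | zero =>
    intro lo hi h1 h2 h3 h4
    rw [bisectLoop, dif_neg (by omega : ¬ lo < hi)]
    omega
  | succ n ih =>
    intro lo hi h1 h2 h3 h4
    by_cases hlh : lo < hi
    · rw [bisectLoop, dif_pos hlh]
      have hmlt : (lo + hi) / 2 < seen.length := by omega
      have hiff := sorted_getD_lt_iff x seen hs ((lo + hi) / 2) hmlt
      by_cases hp : seen.getD ((lo + hi) / 2) 0 < x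
      · rw [if_pos hp]
        exact ih ((lo + hi) / 2 + 1) hi (by omega) (by have := hiff.mp hp; omega) h3 h4
      · rw [if_neg hp]
        have hcle : seen.countP (fun y => decide (y < x)) ≤ (lo + hi) / 2 := by
          by_contra hc
          exact hp (hiff.mpr (by omega))
        exact ih lo ((lo + hi) / 2) (by omega) h2 hcle (by omega)
    · rw [bisectLoop, dif_neg hlh]
      omega

-- (3) inserting at the count position keeps the list sorted
theorem insert_sorted (l : List Int) (x : Int) (hs : l.Pairwise (· ≤ ·)) :
    (l.take (l.countP (fun y => decide (y < x))) ++ x :: l.drop (l.countP (fun y => decide (y < x)))).Pairwise (· ≤ ·) := by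
  have hcl : l.countP (fun y => decide (y < x)) ≤ l.length := List.countP_le_length
  have htake : ∀ a ∈ l.take (l.countP (fun y => decide (y < x))), a < x := by
    intro a ha
    rw [List.mem_take_iff_getElem] at ha
    obtain ⟨j, hj, rfl⟩ := ha
    have hjl : j < l.length := by omega
    rw [← List.getD_eq_getElem l 0 hjl]
    exact (sorted_getD_lt_iff x l hs j hjl).mpr (by omega)
  have hdrop : ∀ b ∈ l.drop (l.countP (fun y => decide (y < x))), x ≤ b := by
    intro b hb
    rw [List.mem_drop_iff_getElem] at hb
    obtain ⟨j, hj, rfl⟩ := hb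
    have hjl : l.countP (fun y => decide (y < x)) + j < l.length := by omega
    rw [← List.getD_eq_getElem l 0 hjl]
    have := (sorted_getD_lt_iff x l hs _ hjl)
    by_contra hc
    omega
  rw [List.pairwise_append]
  refine ⟨hs.take, ?_, ?_⟩
  · rw [List.pairwise_cons]
    exact ⟨hdrop, hs.drop⟩
  · intro a ha b hb
    rcases List.mem_cons.mp hb with rfl | hb
    · exact le_of_lt (htake a ha)
    · exact le_trans (le_of_lt (htake a ha)) (hdrop b hb)

-- (5) B's fold computes specGo
theorem bLoop_eq : ∀ (rest pre seen : List Int) (best : Int),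
    seen.Perm pre → seen.Pairwise (· ≤ ·) →
    (rest.foldl bStep (seen, best)).2 = specGo rest pre best := by
  intro rest
  induction rest with
  | nil => intro pre seen best _ _; simp [specGo]
  | cons y rest ih =>
    intro pre seen best hperm hs
    have hc : bisectLoop seen y 0 seen.length = seen.countP (fun z => decide (z < y)) :=
      bisect_eq seen y hs seen.length 0 seen.length (by omega) (Nat.zero_le _)
        List.countP_le_length le_rfl
    have hcp : seen.countP (fun z => decide (z < y)) = pre.countP (fun z => decide (z < y)) :=
      hperm.countP_eq _
    simp only [List.foldl_cons, bStep, hc]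
    have hmax : (if ((seen.countP (fun z => decide (z < y)) : Int)) > best then
        ((seen.countP (fun z => decide (z < y)) : Int)) else best)
        = max best ((pre.countP (fun z => decide (z < y)) : Int)) := by
      rw [hcp]; split_ifs <;> omega
    rw [hmax]
    have hperm' : (seen.take (seen.countP (fun z => decide (z < y))) ++
        y :: seen.drop (seen.countP (fun z => decide (z < y)))).Perm (pre ++ [y]) := by
      refine (List.perm_middle).trans ?_
      rw [List.take_append_drop]
      exact ((hperm.cons y).trans (List.perm_append_singleton y pre).symm)
    exact ih (pre ++ [y]) _ _ hperm' (insert_sorted seen y hs)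

-- (6) A's inner loop counts the smaller elements in the prefix
theorem inner_eq (pre : List Int) (x : Int) (rest : List Int) :
    maxrakInner (pre ++ x :: rest) (pre.length : Int) = (pre.countP (fun y => decide (y < x)) : Int) := by
  unfold maxrakInner
  rw [PySem.List.foldl_ite_add_one, PySem.List.pyRange_neg_one_eq_reverse, List.countP_reverse]
  have hb : (-1 : Int) + 1 = 0 := by norm_num
  have ha : (pre.length : Int) - 1 + 1 = (pre.length : Int) := by ring
  rw [hb, ha]
  have hx : PySem.List.pyGetD (pre ++ x :: rest) (pre.length : Int) 0 = x := by
    rw [PySem.List.pyGetD_eq_getElem _ _ (by positivity) (by simp)]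
    simp
  rw [hx]
  have hmap : (PySem.List.pyRange 0 (pre.length : Int) 1).map
      (fun j => PySem.List.pyGetD (pre ++ x :: rest) j 0) = pre := by
    have h3 : (PySem.List.pyRange 0 (pre.length : Int) 1).map
        (fun j => PySem.List.pyGetD (pre ++ x :: rest) j 0)
        = (PySem.List.pyRange 0 (pre.length : Int) 1).map (fun j => PySem.List.pyGetD pre j 0) := by
      apply List.map_congr_left
      intro j hj
      rw [PySem.List.mem_pyRange_one] at hj
      rw [PySem.List.pyGetD_eq_getElem _ _ hj.1 (by simp; omega),
          PySem.List.pyGetD_eq_getElem _ _ hj.1 hj.2]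
      rw [List.getElem_append_left (by omega)]
    rw [h3]
    exact PySem.List.map_pyGetD_pyRange_zero pre 0
  rw [zero_add]
  congr 1
  conv_rhs => rw [← hmap]
  rw [List.countP_map]
  apply List.countP_congr
  intro j _
  simp [Function.comp]


-- (8) the inner count is at most the index
theorem inner_le (T : List Int) (i : Int) (h0 : 0 ≤ i) : maxrakInner T i ≤ i := by
  unfold maxrakInner
  rw [PySem.List.foldl_ite_add_one]
  have h := List.countP_le_length
    (l := PySem.List.pyRange (i - 1) (-1) (-1))
    (p := fun j => decide (PySem.List.pyGetD T j 0 < PySem.List.pyGetD T i 0))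
  rw [PySem.List.length_pyRange_neg_one] at h
  omega

-- fold of maxes cannot grow past m when every contribution is ≤ m
theorem foldl_max_const (f : Int → Int) : ∀ (L : List Int) (m : Int),
    (∀ i ∈ L, f i ≤ m) → L.foldl (fun m i => max m (f i)) m = m := by
  intro L
  induction L with
  | nil => intro m _; rfl
  | cons a L ih =>
    intro m h
    rw [List.foldl_cons, max_eq_left (h a List.mem_cons_self)]
    exact ih m (fun j hj => h j (List.mem_cons_of_mem _ hj))

-- (7) A's early-exit loop equals the plain fold of maxes
theorem loop_eq (T : List Int) : ∀ (L : List Int) (m : Int),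
    (∀ i ∈ L, maxrakInner T i ≤ i) → L.Pairwise (· ≥ ·) →
    maxrakLoop T L m = L.foldl (fun m i => max m (maxrakInner T i)) m := by
  intro L
  induction L with
  | nil => intro m _ _; rfl
  | cons i rest ih =>
    intro m hle hsor
    rw [List.pairwise_cons] at hsor
    rw [List.foldl_cons]
    by_cases him : i ≤ m
    · have h1 : max m (maxrakInner T i) = m :=
        max_eq_left (le_trans (hle i List.mem_cons_self) him)
      rw [maxrakLoop, if_pos him, h1]
      exact (foldl_max_const _ rest m (fun j hj =>
        le_trans (hle j (List.mem_cons_of_mem _ hj))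
          (le_trans (hsor.1 j hj) him))).symm
    · rw [maxrakLoop, if_neg him]
      have h2 : (if maxrakInner T i > m then maxrakInner T i else m)
          = max m (maxrakInner T i) := by split_ifs <;> omega
      simp only [h2]
      exact ih _ (fun j hj => hle j (List.mem_cons_of_mem _ hj)) hsor.2

-- (9) max-folds are reversal invariant
theorem foldl_max_push (f : Int → Int) : ∀ (L : List Int) (m x : Int),
    L.foldl (fun m i => max m (f i)) (max m x) = max (L.foldl (fun m i => max m (f i)) m) x := by
  intro L
  induction L with
  | nil => intro m x; rfl
  | cons a L ih =>
    intro m x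
    simp only [List.foldl_cons]
    rw [max_right_comm m x (f a)]
    exact ih (max m (f a)) x

theorem foldl_max_reverse (f : Int → Int) : ∀ (L : List Int) (m : Int),
    L.reverse.foldl (fun m i => max m (f i)) m = L.foldl (fun m i => max m (f i)) m := by
  intro L
  induction L with
  | nil => intro m; rfl
  | cons a L ih =>
    intro m
    simp only [List.reverse_cons, List.foldl_append, List.foldl_cons, List.foldl_nil]
    rw [ih m, ← foldl_max_push]

-- (10) A's ascending index fold computes specGo
theorem main_fold : ∀ (rest pre : List Int) (best : Int) (T : List Int), T = pre ++ rest →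
    (PySem.List.pyRange (pre.length : Int) ((pre.length : Int) + rest.length) 1).foldl
      (fun m i => max m (maxrakInner T i)) best = specGo rest pre best := by
  intro rest
  induction rest with
  | nil =>
    intro pre best T hT
    rw [PySem.List.pyRange_one_eq_nil (by simp)]
    simp [specGo]
  | cons x rest ih =>
    intro pre best T hT
    subst hT
    rw [PySem.List.pyRange_one_cons (by push_cast [List.length_cons]; omega)]
    rw [List.foldl_cons, inner_eq]
    have h := ih (pre ++ [x]) (max best ((pre.countP (fun y => decide (y < x)) : Int)))
      (pre ++ x :: rest) (by simp)
    have hb1 : (((pre ++ [x]).length : Nat) : Int) = (pre.length : Int) + 1 := by simp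
    rw [hb1] at h
    have hb2 : (pre.length : Int) + ((x :: rest).length : Int)
        = ((pre.length : Int) + 1) + (rest.length : Int) := by push_cast [List.length_cons]; ring
    rw [hb2]
    rw [specGo]
    exact h

-- ===== VERDICT (by name: the statement is the Claim_ definition above) =====
theorem maxrak_spec : Claim_equal_maxrak := by
  intro T _
  unfold Spec_maxrak
  cases T with
  | nil => decide
  | cons x rest =>
    unfold maxrak maxrak_alt
    rw [bLoop_eq (x :: rest) [] [] 0 (List.Perm.refl _) List.Pairwise.nil]
    have hle : ∀ i ∈ PySem.List.pyRange (((x :: rest).length : Int) - 1) 0 (-1),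
        maxrakInner (x :: rest) i ≤ i := by
      intro i hi
      rw [PySem.List.mem_pyRange_neg_one] at hi
      exact inner_le _ i (by omega)
    have hsor : (PySem.List.pyRange (((x :: rest).length : Int) - 1) 0 (-1)).Pairwise (· ≥ ·) := by
      rw [PySem.List.pyRange_neg_one_eq_reverse, List.pairwise_reverse]
      exact (PySem.List.pairwise_lt_pyRange_one _ _).imp (fun h => le_of_lt h)
    rw [loop_eq _ _ 0 hle hsor]
    rw [PySem.List.pyRange_neg_one_eq_reverse, foldl_max_reverse]
    have h := main_fold rest [x] 0 (x :: rest) rfl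
    have hb1 : (([x].length : Nat) : Int) = (0 : Int) + 1 := by simp
    rw [hb1] at h
    have hb2 : (0 : Int) + 1 + (rest.length : Int)
        = ((x :: rest).length : Int) - 1 + 1 := by simp; ring
    rw [hb2] at h
    rw [h]
    simp [specGo]
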